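-- pv_equiv track=rewrite | github.com/stevenhorsman/advent-of-code-2019 | day-16/flawed_frequency_transmission.py | transmission2b
-- ===== SOURCE A (Python) =====
-- def transmission2b(curr_phase, phases = 100):
--   for i in range(phases):
--     partial_sum = sum(curr_phase)
--     for j in range(len(curr_phase)):
--       t = partial_sum
--       partial_sum -= curr_phase[j]
--       # Quicker than curr_phase[j] = abs(t) % 10
--       if t >= 0:
--         curr_phase[j] = t % 10
--       else:
--         curr_phase[j] = (-t) % 10
--   return curr_phase
-- ===== SOURCE B (Python) =====
-- def transmission2b(curr_phase, phases = 100):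
--   # Same suffix-sum-mod-10 phases, but each pass runs backwards with a
--   # running accumulator: no subtraction from a precomputed total and no
--   # sign branch. Mutates curr_phase in place like the original.
--   for i in range(phases):
--     running = 0
--     for j in range(len(curr_phase) - 1, -1, -1):
--       running += curr_phase[j]
--       curr_phase[j] = abs(running) % 10
--   return curr_phase
-- ===== Notes on version B (the rewrite author's own statement) =====
-- stated objective: simpler
-- what changed: Each phase is computed by a single backward pass with a running suffix accumulator instead of a forward pass that precomputes the total and subtracts with a sign branch.
import Mathlib
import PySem

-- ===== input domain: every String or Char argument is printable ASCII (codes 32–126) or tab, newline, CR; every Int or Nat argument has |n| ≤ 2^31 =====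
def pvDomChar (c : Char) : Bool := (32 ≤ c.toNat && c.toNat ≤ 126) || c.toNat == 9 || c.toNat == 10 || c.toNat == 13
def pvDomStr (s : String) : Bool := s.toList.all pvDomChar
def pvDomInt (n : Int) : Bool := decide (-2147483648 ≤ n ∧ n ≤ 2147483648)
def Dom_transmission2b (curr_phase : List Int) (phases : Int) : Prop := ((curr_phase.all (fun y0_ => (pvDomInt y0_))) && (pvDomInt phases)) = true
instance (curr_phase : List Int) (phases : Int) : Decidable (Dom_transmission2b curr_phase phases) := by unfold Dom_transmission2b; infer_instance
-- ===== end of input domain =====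

-- ===== PORT A =====
-- A: for each phase, forward pass over indices; partial_sum starts as the
-- whole sum and has curr[j] subtracted before curr[j] is overwritten.
def pvInnerStepA (st : List Int × Int) (j : Int) : List Int × Int :=
  let t := st.2
  let ps := st.2 - (PySem.List.pyGet? st.1 j).getD 0   -- index j is in range on every call here
  let v := if t ≥ 0 then PySem.Int.mod t 10 else PySem.Int.mod (-t) 10
  (st.1.set j.toNat v, ps)

def transmission2b (curr_phase : List Int) (phases : Int) : List Int :=
  (PySem.List.pyRange 0 phases 1).foldl
    (fun c _ =>
      ((PySem.List.pyRange 0 (c.length : Int) 1).foldl pvInnerStepA (c, c.sum)).1)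
    curr_phase

-- ===== PORT B =====
-- B: each phase is one backward pass with a running accumulator (the foldr is
-- the structural form of Source B's reversed index loop, carrying `running`).
def pvRevAccum (c : List Int) : List Int :=
  (c.foldr
    (fun x (st : Int × List Int) =>
      let r := st.1 + x
      (r, PySem.Int.mod |r| 10 :: st.2))
    (0, [])).2

def transmission2b_alt (curr_phase : List Int) (phases : Int) : List Int :=
  (PySem.List.pyRange 0 phases 1).foldl (fun c _ => pvRevAccum c) curr_phase

-- ===== PRECONDITION & SPEC =====
def Spec_transmission2b (curr_phase : List Int) (phases : Int) (out : List Int) : Prop := out = transmission2b_alt curr_phase phases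
instance (curr_phase : List Int) (phases : Int) (out : List Int) : Decidable (Spec_transmission2b curr_phase phases out) := by unfold Spec_transmission2b; infer_instance

-- ===== CLAIM (what is proved, stated in full; the proofs are below) =====
def Claim_equal_transmission2b : Prop := ∀ (curr_phase : List Int) (phases : Int), Dom_transmission2b curr_phase phases → Spec_transmission2b curr_phase phases (transmission2b curr_phase phases)

-- ===== LEMMAS AND PROOFS =====

-- common characterisation of one phase: suffix sums, |·| % 10
def pvSuffixMap : List Int → List Int
  | [] => []
  | x :: xs => PySem.Int.mod |x + xs.sum| 10 :: pvSuffixMap xs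

lemma pvRevAccum_foldr (l : List Int) :
    l.foldr
      (fun x (st : Int × List Int) =>
        let r := st.1 + x
        (r, PySem.Int.mod |r| 10 :: st.2))
      (0, []) = (l.sum, pvSuffixMap l) := by
  induction l with
  | nil => rfl
  | cons x xs ih =>
    simp only [List.foldr_cons, ih, pvSuffixMap, List.sum_cons]
    rw [add_comm xs.sum x]

lemma pvRevAccum_eq (l : List Int) : pvRevAccum l = pvSuffixMap l := by
  unfold pvRevAccum
  rw [pvRevAccum_foldr]

lemma pvInnerA_inv (rest p : List Int) :
    ((PySem.List.pyRange (p.length : Int) ((p.length : Int) + rest.length) 1).foldl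
        pvInnerStepA (p ++ rest, rest.sum)).1 = p ++ pvSuffixMap rest := by
  induction rest generalizing p with
  | nil => simp [pvSuffixMap]
  | cons x xs ih =>
    rw [show ((p.length : Int) + (x :: xs).length) = ((p.length : Int) + 1) + xs.length by
      simp; ring]
    rw [PySem.List.pyRange_one_cons (by omega)]
    have hget : (PySem.List.pyGet? (p ++ x :: xs) (p.length : Int)).getD 0 = x := by
      rw [PySem.List.pyGet?_natCast]
      simp
    have hset : (p ++ x :: xs).set ((p.length : Int)).toNat
        (PySem.Int.mod |x + xs.sum| 10) = (p ++ [PySem.Int.mod |x + xs.sum| 10]) ++ xs := by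
      simp
    have hv : (if (x + xs.sum : Int) ≥ 0 then PySem.Int.mod (x + xs.sum) 10
        else PySem.Int.mod (-(x + xs.sum)) 10) = PySem.Int.mod |x + xs.sum| 10 := by
      rcases le_or_gt 0 (x + xs.sum) with h | h
      · rw [if_pos h, abs_of_nonneg h]
      · rw [if_neg (by omega), abs_of_neg h]
    rw [List.foldl_cons]
    have hstep : pvInnerStepA (p ++ x :: xs, (x :: xs).sum) (p.length : Int)
        = ((p ++ [PySem.Int.mod |x + xs.sum| 10]) ++ xs, xs.sum) := by
      simp only [pvInnerStepA, List.sum_cons, hget, hv, hset]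
      norm_num
    rw [hstep]
    have := ih (p ++ [PySem.Int.mod |x + xs.sum| 10])
    simp only [List.length_append, List.length_cons, List.length_nil] at this ⊢
    rw [show ((p.length : Int) + 1) = (((p.length + 1 : Nat)) : Int) by push_cast; ring]
    rw [show ((p.length + 1 : Nat) : Int) + (xs.length : Int)
        = ((p.length + (0+1) : Nat) : Int) + (xs.length : Int) by norm_num] at this ⊢
    rw [this]
    simp [pvSuffixMap]

lemma pvPhaseA_eq (c : List Int) :
    ((PySem.List.pyRange 0 (c.length : Int) 1).foldl pvInnerStepA (c, c.sum)).1
      = pvRevAccum c := by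
  have := pvInnerA_inv c []
  simpa [pvRevAccum_eq] using this

lemma pvFoldl_phases_eq (js : List Int) (c : List Int) :
    js.foldl
      (fun c _ => ((PySem.List.pyRange 0 (c.length : Int) 1).foldl pvInnerStepA (c, c.sum)).1) c
      = js.foldl (fun c _ => pvRevAccum c) c := by
  induction js generalizing c with
  | nil => rfl
  | cons j js ih =>
    rw [List.foldl_cons, List.foldl_cons, pvPhaseA_eq]
    exact ih _

-- ===== VERDICT (by name: the statement is the Claim_ definition above) =====
theorem transmission2b_spec : Claim_equal_transmission2b := by
  intro curr_phase phases _
  exact pvFoldl_phases_eq _ curr_phase
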